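-- pv_equiv track=rewrite | github.com/robdenroche/advent-of-code-2023 | day01/day01.py | replace_leftmost_number
-- ===== SOURCE A (Python) =====
-- text_int_dict = {
--     "one": "1",
--     "two": "2",
--     "three": "3",
--     "four": "4",
--     "five": "5",
--     "six": "6",
--     "seven": "7",
--     "eight": "8",
--     "nine": "9"
-- }
--
-- def replace_leftmost_number(line):
--     leftmost_pos = None
--     leftmost_text = None
--
--     for text in text_int_dict.keys():
--         index = line.find(text)
--         if index > -1:
--             if leftmost_pos is None or index < leftmost_pos:
--                 leftmost_pos = index
--                 leftmost_text = text
--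
--     if leftmost_text is not None:
--         line = line.replace(leftmost_text, text_int_dict[leftmost_text])
--     return line
-- ===== SOURCE B (Python) =====
-- _WORDS = [("one", "1"), ("two", "2"), ("three", "3"), ("four", "4"),
--           ("five", "5"), ("six", "6"), ("seven", "7"), ("eight", "8"), ("nine", "9")]
--
-- def replace_leftmost_number(line):
--     # walk the suffixes left to right; stop at the first one beginning with a number-word
--     suffix = line
--     while suffix:
--         for word, digit in _WORDS:
--             if suffix.startswith(word):
--                 return line.replace(word, digit)
--         suffix = suffix[1:]
--     return line
-- ===== Notes on version B (the rewrite author's own statement) =====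
-- stated objective: alternative
-- what changed: B walks the string's suffixes once left to right and stops at the first suffix that begins with any number-word, instead of A's nine separate str.find passes with an argmin over their positions.
import Mathlib
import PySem

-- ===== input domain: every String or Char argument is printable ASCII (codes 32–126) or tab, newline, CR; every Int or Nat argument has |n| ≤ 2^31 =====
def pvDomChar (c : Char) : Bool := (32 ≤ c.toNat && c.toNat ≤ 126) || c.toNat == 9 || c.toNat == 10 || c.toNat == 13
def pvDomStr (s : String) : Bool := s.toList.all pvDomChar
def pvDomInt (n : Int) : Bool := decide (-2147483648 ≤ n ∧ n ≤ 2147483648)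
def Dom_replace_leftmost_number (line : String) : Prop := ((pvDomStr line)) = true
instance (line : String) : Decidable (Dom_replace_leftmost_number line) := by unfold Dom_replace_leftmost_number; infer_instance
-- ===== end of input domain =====

-- B replaces A's nine str.find passes + argmin by a single left-to-right walk over the suffixes
-- that stops at the first suffix beginning with a number-word (objective: alternative, same cost).

-- ===== PORT A =====
-- text_int_dict (module-level dict; keys are the nine number-words)
def pvTextIntDict : PySem.Dict (List Char) (List Char) := PySem.Dict.mk
  [ (['o','n','e'], ['1']), (['t','w','o'], ['2']), (['t','h','r','e','e'], ['3'])
  , (['f','o','u','r'], ['4']), (['f','i','v','e'], ['5']), (['s','i','x'], ['6'])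
  , (['s','e','v','e','n'], ['7']), (['e','i','g','h','t'], ['8']), (['n','i','n','e'], ['9']) ]

-- loop body: update (leftmost_pos, leftmost_text) with index = line.find(text)
def pvStepA (s : List Char) (st : Option Int × Option (List Char)) (text : List Char) :
    Option Int × Option (List Char) :=
  let index := PySem.Chars.find s text
  if index > -1 then
    match st.1 with
    | none => (some index, some text)
    | some lp => if index < lp then (some index, some text) else st
  else st

def replace_leftmost_number (line : String) : String :=
  let st := pvTextIntDict.keys.foldl (pvStepA line.toList) (none, none)
  match st.2 with
  | some text =>
      -- text_int_dict[leftmost_text]: the key is always a dict key, so get? is never none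
      String.ofList (PySem.Chars.replace line.toList text ((pvTextIntDict.get? text).getD []))
  | none => line

-- ===== PORT B =====
-- _WORDS (module-level list of (word, digit) pairs; each digit is the single replacement char)
def pvWordsB : List (String × Char) :=
  [("one", '1'), ("two", '2'), ("three", '3'), ("four", '4'),
   ("five", '5'), ("six", '6'), ("seven", '7'), ("eight", '8'), ("nine", '9')]

-- `while suffix: … suffix = suffix[1:]` transcribed as structural recursion over the suffix;
-- the inner `for word, digit in _WORDS: if suffix.startswith(word): return …` is List.find?
def pvScanB (suffix : List Char) : Option (String × Char) :=
  match suffix with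
  | [] => none
  | _ :: tail =>
    match pvWordsB.find? (fun wd => PySem.Chars.startswith suffix wd.1.toList) with
    | some wd => some wd
    | none => pvScanB tail

def replace_leftmost_number_alt (line : String) : String :=
  match pvScanB line.toList with
  | some wd => String.ofList (PySem.Chars.replace line.toList wd.1.toList [wd.2])
  | none => line

-- ===== PRECONDITION & SPEC =====
def Spec_replace_leftmost_number (line : String) (out : String) : Prop := out = replace_leftmost_number_alt line
instance (line : String) (out : String) : Decidable (Spec_replace_leftmost_number line out) := by unfold Spec_replace_leftmost_number; infer_instance

-- ===== CLAIM (what is proved, stated in full; the proofs are below) =====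
def Claim_equal_replace_leftmost_number : Prop := ∀ (line : String), Dom_replace_leftmost_number line → Spec_replace_leftmost_number line (replace_leftmost_number line)

-- ===== LEMMAS AND PROOFS =====

lemma pvWords_ne_nil : ∀ p ∈ pvWordsB, p.1.toList ≠ [] := by decide

-- no number-word is a prefix of another (they are pairwise prefix-incomparable)
lemma pvWords_incomp : ∀ p ∈ pvWordsB, ∀ q ∈ pvWordsB, p.1.toList <+: q.1.toList → p = q := by
  decide

lemma pvKeys_eq : pvTextIntDict.keys = pvWordsB.map (fun p => p.1.toList) := by decide

lemma pvLookup : ∀ p ∈ pvWordsB, pvTextIntDict.get? p.1.toList = some [p.2] := by decide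

-- at most one number-word starts at a given position
lemma pvUniq {t : List Char} {p q : String × Char} (hp : p ∈ pvWordsB)
    (hq : q ∈ pvWordsB) (h1 : p.1.toList <+: t) (h2 : q.1.toList <+: t) : p = q := by
  rcases List.prefix_or_prefix_of_prefix h1 h2 with h | h
  · exact pvWords_incomp p hp q hq h
  · exact (pvWords_incomp q hq p hp h).symm

lemma pvScanB_none : ∀ t : List Char, pvScanB t = none ↔ ∀ p ∈ pvWordsB, ¬ p.1.toList <:+: t := by
  intro t
  induction t with
  | nil =>
    simp only [pvScanB, true_iff]
    intro p hp hinf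
    exact pvWords_ne_nil p hp (List.infix_nil.mp hinf)
  | cons c rest ih =>
    simp only [pvScanB]
    cases hf : pvWordsB.find? (fun wd => PySem.Chars.startswith (c :: rest) wd.1.toList) with
    | some p =>
      simp only [reduceCtorEq, false_iff, not_forall]
      refine ⟨p, List.mem_of_find?_eq_some hf, ?_⟩
      have hsw := List.find?_some hf
      have hpre : p.1.toList <+: c :: rest := (PySem.Chars.startswith_iff _ _).mp hsw
      simp only [not_not]
      exact hpre.isInfix
    | none =>
      rw [ih]
      have hno : ∀ p ∈ pvWordsB, ¬ p.1.toList <+: c :: rest := by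
        intro p hp hpre
        have := List.find?_eq_none.mp hf p hp
        rw [(PySem.Chars.startswith_iff _ _)] at this
        · exact this hpre
      constructor
      · intro h p hp hinf
        rcases List.infix_cons_iff.mp hinf with hpre | hinf'
        · exact hno p hp hpre
        · exact h p hp hinf'
      · intro h p hp hinf
        exact h p hp (List.infix_cons_iff.mpr (Or.inr hinf))

lemma pvScanB_some : ∀ (t : List Char) (p : String × Char), pvScanB t = some p →
    p ∈ pvWordsB ∧ ∃ i : Nat, p.1.toList <+: t.drop i ∧
      ∀ j < i, ∀ q ∈ pvWordsB, ¬ q.1.toList <+: t.drop j := by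
  intro t
  induction t with
  | nil => intro p h; simp [pvScanB] at h
  | cons c rest ih =>
    intro p h
    simp only [pvScanB] at h
    cases hf : pvWordsB.find? (fun wd => PySem.Chars.startswith (c :: rest) wd.1.toList) with
    | some p' =>
      rw [hf] at h
      cases h
      refine ⟨List.mem_of_find?_eq_some hf, 0, ?_, by omega⟩
      simp only [List.drop_zero]
      have hsw := List.find?_some hf
      exact (PySem.Chars.startswith_iff _ _).mp hsw
    | none =>
      rw [hf] at h
      obtain ⟨hmem, i, hpre, hmin⟩ := ih p h
      refine ⟨hmem, i + 1, by simpa using hpre, ?_⟩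
      intro j hj q hq
      cases j with
      | zero =>
        intro hpre'
        have := List.find?_eq_none.mp hf q hq
        rw [(PySem.Chars.startswith_iff _ _)] at this
        exact this hpre'
      | succ j' =>
        simpa using hmin j' (by omega) q hq

-- find s sub = i when sub starts at i and at no earlier position
lemma pvFind_at (s sub : List Char) (i : Nat) (hp : sub <+: s.drop i)
    (hmin : ∀ j < i, ¬ sub <+: s.drop j) : PySem.Chars.find s sub = (i : Int) := by
  have hinf : sub <:+: s := by
    obtain ⟨u, hu⟩ := hp
    exact ⟨s.take i, u, by rw [List.append_assoc, hu, List.take_append_drop]⟩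
  have h0 : 0 ≤ PySem.Chars.find s sub := (PySem.Chars.find_nonneg_iff _ _).mpr hinf
  obtain ⟨hpre, hm⟩ := PySem.Chars.find_spec h0
  have hk : (PySem.Chars.find s sub).toNat = i := by
    rcases Nat.lt_trichotomy (PySem.Chars.find s sub).toNat i with h | h | h
    · exact absurd hpre (hmin _ h)
    · exact h
    · exact absurd hp (hm i h)
  omega

lemma pvFoldA_nil (s : List Char) : ∀ (l : List (List Char))
    (acc : Option Int × Option (List Char)),
    (∀ q ∈ l, PySem.Chars.find s q = -1) → l.foldl (pvStepA s) acc = acc := by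
  intro l
  induction l with
  | nil => intro acc _; rfl
  | cons q rest ih =>
    intro acc h
    have hq : PySem.Chars.find s q = -1 := h q (by simp)
    have hstep : pvStepA s acc q = acc := by
      simp [pvStepA, hq]
    rw [List.foldl_cons, hstep]
    exact ih acc (fun q' hq' => h q' (by simp [hq']))

lemma pvFoldA_keep (s : List Char) (m : Int) (w : List Char) : ∀ (l : List (List Char)),
    (∀ q ∈ l, PySem.Chars.find s q = -1 ∨ m ≤ PySem.Chars.find s q) →
    l.foldl (pvStepA s) (some m, some w) = (some m, some w) := by
  intro l
  induction l with
  | nil => intro _; rfl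
  | cons q rest ih =>
    intro h
    have hstep : pvStepA s (some m, some w) q = (some m, some w) := by
      rcases h q (by simp) with hq | hq
      · simp [pvStepA, hq]
      · by_cases hgt : PySem.Chars.find s q > -1
        · simp only [pvStepA, if_pos hgt]
          simp only [if_neg (by omega : ¬ PySem.Chars.find s q < m)]
        · simp [pvStepA, hgt]
    rw [List.foldl_cons, hstep]
    exact ih (fun q' hq' => h q' (by simp [hq']))

lemma pvFoldA_min (s : List Char) (m : Int) (w : List Char) : ∀ (l : List (List Char))
    (acc : Option Int × Option (List Char)), w ∈ l → PySem.Chars.find s w = m → 0 ≤ m →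
    (∀ q ∈ l, q ≠ w → PySem.Chars.find s q = -1 ∨ m < PySem.Chars.find s q) →
    (acc = (none, none) ∨ ∃ a t, acc = (some a, some t) ∧ m < a) →
    l.foldl (pvStepA s) acc = (some m, some w) := by
  intro l
  induction l with
  | nil => intro acc hw; simp at hw
  | cons q rest ih =>
    intro acc hw hfw hm hothers hacc
    by_cases hqw : q = w
    · subst hqw
      have hstep : pvStepA s acc q = (some m, some q) := by
        rcases hacc with h | ⟨a, t, h, hma⟩
        · subst h; simp [pvStepA, hfw, show m > -1 by omega]
        · subst h
          simp [pvStepA, hfw, show m > -1 by omega, hma]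
      rw [List.foldl_cons, hstep]
      apply pvFoldA_keep
      intro q' hq'
      by_cases h' : q' = q
      · right; rw [h', hfw]
      · rcases hothers q' (by simp [hq']) h' with h | h
        · exact Or.inl h
        · exact Or.inr (le_of_lt h)
    · have hwrest : w ∈ rest := by
        rcases List.mem_cons.mp hw with h | h
        · exact absurd h.symm hqw
        · exact h
      rcases hothers q (by simp) hqw with hq | hq
      · have hstep : pvStepA s acc q = acc := by simp [pvStepA, hq]
        rw [List.foldl_cons, hstep]
        exact ih acc hwrest hfw hm (fun q' hq' h' => hothers q' (by simp [hq']) h') hacc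
      · rw [List.foldl_cons]
        apply ih _ hwrest hfw hm (fun q' hq' h' => hothers q' (by simp [hq']) h')
        rcases hacc with h | ⟨a, t, h, hma⟩
        · subst h
          right
          refine ⟨PySem.Chars.find s q, q, ?_, hq⟩
          simp [pvStepA, show PySem.Chars.find s q > -1 by omega]
        · subst h
          by_cases hlt : PySem.Chars.find s q < a
          · right
            refine ⟨PySem.Chars.find s q, q, ?_, hq⟩
            simp [pvStepA, show PySem.Chars.find s q > -1 by omega, hlt]
          · right
            refine ⟨a, t, ?_, hma⟩
            simp [pvStepA, show PySem.Chars.find s q > -1 by omega, hlt]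

-- ===== VERDICT (by name: the statement is the Claim_ definition above) =====
theorem replace_leftmost_number_spec : Claim_equal_replace_leftmost_number := by
  unfold Claim_equal_replace_leftmost_number
  intro line _
  unfold Spec_replace_leftmost_number
  unfold replace_leftmost_number replace_leftmost_number_alt
  rw [pvKeys_eq]
  by_cases h : ∀ p ∈ pvWordsB, ¬ p.1.toList <:+: line.toList
  · -- no number-word occurs: both return line
    have hscan : pvScanB line.toList = none := (pvScanB_none _).mpr h
    have hall : ∀ q ∈ pvWordsB.map (fun p => p.1.toList), PySem.Chars.find line.toList q = -1 := by
      intro q hq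
      obtain ⟨p, hp, rfl⟩ := List.mem_map.mp hq
      exact (PySem.Chars.find_eq_neg_one_iff _ _).mpr (h p hp)
    rw [pvFoldA_nil line.toList _ _ hall, hscan]
  · cases hscan : pvScanB line.toList with
    | none => exact absurd ((pvScanB_none _).mp hscan) h
    | some p₀ =>
      obtain ⟨hmem, i, hpre, hmin⟩ := pvScanB_some _ _ hscan
      have hfind : PySem.Chars.find line.toList p₀.1.toList = (i : Int) :=
        pvFind_at _ _ _ hpre (fun j hj => hmin j hj p₀ hmem)
      have hothers : ∀ q ∈ pvWordsB.map (fun p => p.1.toList), q ≠ p₀.1.toList →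
          PySem.Chars.find line.toList q = -1 ∨ (i : Int) < PySem.Chars.find line.toList q := by
        intro q hq hne
        obtain ⟨p', hp', rfl⟩ := List.mem_map.mp hq
        by_cases hneg : PySem.Chars.find line.toList p'.1.toList = -1
        · exact Or.inl hneg
        · right
          have h0 : 0 ≤ PySem.Chars.find line.toList p'.1.toList := by
            have := PySem.Chars.neg_one_le_find line.toList p'.1.toList
            omega
          obtain ⟨hpre', hm'⟩ := PySem.Chars.find_spec h0
          set k := (PySem.Chars.find line.toList p'.1.toList).toNat with hk
          have hik : i ≤ k := by
            by_contra hlt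
            exact hmin k (by omega) p' hp' hpre'
          have hik' : i ≠ k := by
            intro heq
            rw [← heq] at hpre'
            exact hne (congrArg (fun r => r.1.toList) (pvUniq hp' hmem hpre' hpre))
          omega
      rw [pvFoldA_min line.toList (i : Int) p₀.1.toList _ _
            (List.mem_map.mpr ⟨p₀, hmem, rfl⟩) hfind (by omega) hothers (Or.inl rfl)]
      simp only [pvLookup p₀ hmem, Option.getD_some]
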